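-- pv_equiv track=rewrite | github.com/imsoncod/Python-Algorithm | Programmers/더 맵게.py | solution
-- ===== SOURCE A (Python) =====
-- import heapq
--
-- def solution(s, K):
--     heapq.heapify(s)
--     cnt=0
--     while s[0]<K:
--         try:
--             a = heapq.heappop(s)
--             b = heapq.heappop(s)
--             heapq.heappush(s,a+b*2)
--         except IndexError:
--             return -1
--         cnt+=1
--     return cnt
-- ===== SOURCE B (Python) =====
-- def _insort(x, lst):
--     # insert x into sorted lst, keeping it sorted (before the first element >= x)
--     i = 0
--     while i < len(lst) and lst[i] < x:
--         i += 1
--     lst.insert(i, x)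
--
-- def solution(s, K):
--     # sorted working list instead of a heap; A mutates s in place, B does not
--     # (return-value equivalence only)
--     s = sorted(s)
--     cnt = 0
--     while s[0] < K:
--         if len(s) < 2:
--             return -1
--         a = s.pop(0)
--         b = s.pop(0)
--         _insort(a + b * 2, s)
--         cnt += 1
--     return cnt
-- ===== Notes on version B (the rewrite author's own statement) =====
-- stated objective: alternative
-- what changed: Replaces heapq's binary min-heap with a once-sorted list maintained by ordered insertion: the two smallest elements are popped from the front and the mixed value is reinserted at its sorted position.
import Mathlib
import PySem

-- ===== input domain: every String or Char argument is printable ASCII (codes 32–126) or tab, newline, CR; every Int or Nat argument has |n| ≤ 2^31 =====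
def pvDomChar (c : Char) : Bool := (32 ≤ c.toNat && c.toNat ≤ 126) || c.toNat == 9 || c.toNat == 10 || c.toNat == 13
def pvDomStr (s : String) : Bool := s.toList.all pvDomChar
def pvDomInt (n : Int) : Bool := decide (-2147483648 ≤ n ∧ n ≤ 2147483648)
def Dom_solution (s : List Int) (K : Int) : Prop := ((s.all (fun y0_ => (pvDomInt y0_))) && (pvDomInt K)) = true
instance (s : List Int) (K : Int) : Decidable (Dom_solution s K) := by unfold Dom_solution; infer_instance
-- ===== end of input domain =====

-- B replaces heapq's min-heap with a once-sorted list maintained by ordered insertion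
-- (alternative decomposition; return-value equivalence only: A heapifies s in place, B does not mutate s).


-- ===== PORT A =====
-- heapq is modelled by its contract: the heap is the multiset of elements, heappop removes
-- the minimum (min? none = empty heap = IndexError), heappush adds the element.
-- while s[0] < K: a = heappop(s); b = heappop(s) (IndexError → -1); heappush(s, a+b*2); cnt += 1
def solutionLoopA (K : Int) (l : List Int) (cnt : Int) : Int :=
  match hl : PySem.List.min? l (fun y => y) with
  | none => 0                                   -- s[0] raises IndexError here (outside Pre_)
  | some m =>
    if m < K then
      match hl2 : PySem.List.min? (l.erase m) (fun y => y) with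
      | none => -1                              -- second heappop raises IndexError → except → -1
      | some b => solutionLoopA K ((m + b * 2) :: (l.erase m).erase b) (cnt + 1)
    else cnt
termination_by l.length
decreasing_by
  have hm : m ∈ l := PySem.List.min?_mem hl
  have hb : b ∈ l.erase m := PySem.List.min?_mem hl2
  have h1 := List.length_erase_of_mem hm
  have h2 := List.length_erase_of_mem hb
  have h3 : 0 < l.length := List.length_pos_of_mem hm
  have h4 : 0 < (l.erase m).length := List.length_pos_of_mem hb
  simp only [List.length_cons]
  omega

def solution (s : List Int) (K : Int) : Int := solutionLoopA K s 0

-- ===== PORT B =====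
-- _insort(x, lst): advance while lst[i] < x, insert x there (lst stays sorted)
def bIns (x : Int) : List Int → List Int
  | [] => [x]
  | y :: ys => if y < x then y :: bIns x ys else x :: y :: ys

-- cited by loopB's decreasing_by, so it stays above the port
lemma length_bIns (x : Int) (l : List Int) : (bIns x l).length = l.length + 1 := by
  induction l with
  | nil => rfl
  | cons y ys ih => simp only [bIns]; split <;> simp [ih]

-- while s[0] < K: if len(s) < 2 return -1; a = s.pop(0); b = s.pop(0); _insort(a+b*2, s); cnt += 1
def solutionLoopB (K : Int) (l : List Int) (cnt : Int) : Int :=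
  match l with
  | [] => 0                                     -- s[0] raises IndexError here (outside Pre_)
  | a :: rest =>
    if a < K then
      match rest with
      | [] => -1
      | b :: rest' => solutionLoopB K (bIns (a + b * 2) rest') (cnt + 1)
    else cnt
termination_by l.length
decreasing_by
  simp only [List.length_cons, length_bIns]
  omega

def solution_alt (s : List Int) (K : Int) : Int :=
  solutionLoopB K (PySem.List.sorted s (fun x => x) false) 0

-- ===== PRECONDITION & SPEC =====
-- Pre_ excludes only the empty list, on which A raises IndexError at s[0].
def Pre_solution (s : List Int) (K : Int) : Prop := s ≠ []
instance (s : List Int) (K : Int) : Decidable (Pre_solution s K) := by unfold Pre_solution; infer_instance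
def pvWitness_solution : List Int × Int := ([1, 2, 3, 9, 10, 12], 7)

def Spec_solution (s : List Int) (K : Int) (out : Int) : Prop := out = solution_alt s K
instance (s : List Int) (K : Int) (out : Int) : Decidable (Spec_solution s K out) := by unfold Spec_solution; infer_instance

-- ===== CLAIM (what is proved, stated in full; the proofs are below) =====
def Claim_equal_solution : Prop := ∀ (s : List Int) (K : Int), Dom_solution s K → Pre_solution s K → Spec_solution s K (solution s K)

-- ===== LEMMAS AND PROOFS =====

lemma bIns_perm (x : Int) (l : List Int) : (bIns x l).Perm (x :: l) := by
  induction l with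
  | nil => exact List.Perm.refl _
  | cons y ys ih =>
    simp only [bIns]
    split
    · exact (ih.cons y).trans (List.Perm.swap x y ys)
    · exact List.Perm.refl _

lemma bIns_pairwise (x : Int) (l : List Int) (h : l.Pairwise (· ≤ ·)) :
    (bIns x l).Pairwise (· ≤ ·) := by
  induction l with
  | nil => simp [bIns]
  | cons y ys ih =>
    simp only [bIns]
    rcases List.pairwise_cons.1 h with ⟨hy, hys⟩
    split
    · rename_i hyx
      refine List.pairwise_cons.2 ⟨?_, ih hys⟩
      intro z hz
      rcases List.mem_cons.1 ((bIns_perm x ys).mem_iff.1 hz) with rfl | hz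
      · exact le_of_lt hyx
      · exact hy z hz
    · rename_i hyx
      refine List.pairwise_cons.2 ⟨?_, h⟩
      intro z hz
      rcases List.mem_cons.1 hz with rfl | hz
      · exact le_of_not_gt hyx
      · exact le_trans (le_of_not_gt hyx) (hy z hz)

-- heap (multiset) loop = sorted-list loop, for any permutation-equal sorted mirror
lemma loop_eq (K : Int) : ∀ n (l l' : List Int), l.length = n → l.Perm l' →
    l'.Pairwise (· ≤ ·) → ∀ cnt, solutionLoopA K l cnt = solutionLoopB K l' cnt := by
  intro n
  induction n using Nat.strong_induction_on with
  | _ n ih =>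
    intro l l' hlen hperm hsorted cnt
    match hl' : l' with
    | [] =>
      have hlnil : l = [] := hperm.eq_nil
      subst hlnil
      rw [solutionLoopA.eq_def, solutionLoopB.eq_def]
      rfl
    | a :: rest =>
      have hlne : l ≠ [] := by
        intro h; subst h; exact absurd hperm.symm.eq_nil (by simp)
      -- the head of the sorted mirror is the minimum of l
      have hmin : PySem.List.min? l (fun y => y) = some a := by
        rcases hm : PySem.List.min? l (fun y => y) with _ | m
        · exact absurd ((PySem.List.min?_eq_none_iff _ _).1 hm) hlne
        · have hma : m ∈ a :: rest := hperm.subset (PySem.List.min?_mem hm)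
          have hal : a ∈ l := hperm.symm.subset (List.mem_cons_self)
          have h1 : m ≤ a := PySem.List.min?_isMin hm a hal
          have h2 : a ≤ m := by
            rcases List.mem_cons.1 hma with rfl | hmr
            · exact le_refl _
            · exact (List.pairwise_cons.1 hsorted).1 m hmr
          exact congrArg some (le_antisymm h1 h2)
      rw [solutionLoopA.eq_def, solutionLoopB.eq_def]
      split
      · rename_i heq
        rw [hmin] at heq; exact absurd heq (by simp)
      · rename_i m heq
        rw [hmin] at heq
        injection heq with heq'
        subst heq'
        by_cases hK : a < K
        · simp only [if_pos hK]
          have hperase : (l.erase a).Perm rest := by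
            have := hperm.erase a
            rwa [List.erase_cons_head] at this
          cases rest with
          | nil =>
            have hnil : l.erase a = [] := hperase.eq_nil
            have hnone : PySem.List.min? (l.erase a) (fun y => y) = none := by
              rw [hnil]; rfl
            split
            · rfl
            · rename_i b heq2
              rw [hnone] at heq2; exact absurd heq2 (by simp)
          | cons b rest' =>
            have hsorted' : (b :: rest').Pairwise (· ≤ ·) :=
              (List.pairwise_cons.1 hsorted).2
            have herne : l.erase a ≠ [] := by
              intro h
              exact absurd ((h ▸ hperase).symm.eq_nil) (by simp)
            have hmin2 : PySem.List.min? (l.erase a) (fun y => y) = some b := by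
              rcases hm : PySem.List.min? (l.erase a) (fun y => y) with _ | m
              · exact absurd ((PySem.List.min?_eq_none_iff _ _).1 hm) herne
              · have hmb : m ∈ b :: rest' := (hperase).subset (PySem.List.min?_mem hm)
                have hbl : b ∈ l.erase a := (hperase).symm.subset (List.mem_cons_self)
                have h1 : m ≤ b := PySem.List.min?_isMin hm b hbl
                have h2 : b ≤ m := by
                  rcases List.mem_cons.1 hmb with rfl | hmr
                  · exact le_refl _
                  · exact (List.pairwise_cons.1 hsorted').1 m hmr
                exact congrArg some (le_antisymm h1 h2)
            split
            · rename_i heq2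
              rw [hmin2] at heq2; exact absurd heq2 (by simp)
            · rename_i b2 heq2
              rw [hmin2] at heq2
              injection heq2 with heq2'
              subst heq2'
              -- recurse: next multisets are permutation-equal, next mirror is sorted
              have hperase2 : ((l.erase a).erase b).Perm rest' := by
                have := (hperase).erase b
                rwa [List.erase_cons_head] at this
              have hal : a ∈ l := hperm.symm.subset (List.mem_cons_self)
              have hbl : b ∈ l.erase a := (hperase).symm.subset (List.mem_cons_self)
              have hlen1 := List.length_erase_of_mem hal
              have hlen2 := List.length_erase_of_mem hbl
              have hpos1 : 0 < l.length := List.length_pos_of_mem hal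
              have hpos2 : 0 < (l.erase a).length := List.length_pos_of_mem hbl
              exact ih (((a + b * 2) :: (l.erase a).erase b).length)
                (by simp only [List.length_cons]; omega)
                _ _ rfl
                ((hperase2.cons _).trans (bIns_perm (a + b * 2) rest').symm)
                (bIns_pairwise _ _ (List.pairwise_cons.1 hsorted').2)
                (cnt + 1)
        · simp [hK]

-- ===== VERDICT (by name: the statement is the Claim_ definition above) =====
theorem solution_spec : Claim_equal_solution := by
  intro s K _ _
  unfold Spec_solution solution solution_alt
  exact loop_eq K s.length s (PySem.List.sorted s (fun x => x) false) rfl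
    (PySem.List.sorted_perm s (fun x => x) false).symm
    (PySem.List.sorted_pairwise s (fun x => x)) 0
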